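-- pv_equiv track=rewrite | github.com/nagateja8185/stegano-safe | modules/steganography.py | _extract_nbpc
-- ===== SOURCE A (Python) =====
-- def _extract_nbpc(pixels: list, num_px: int,
--                   count: int, bpc: int) -> list:
--     """Extract `count` bits using N-bit-per-channel LSB."""
--     bits: list = []
--     lsb_mask = (1 << bpc) - 1
--     for px_idx in range(num_px):
--         if len(bits) >= count:
--             break
--         for ch in range(3):
--             if len(bits) >= count:
--                 break
--             val = pixels[px_idx][ch] & lsb_mask  # type: ignore[index]
--             for bi in range(bpc - 1, -1, -1):
--                 if len(bits) >= count:
--                     break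
--                 bits.append((val >> bi) & 1)
--     return bits
-- ===== SOURCE B (Python) =====
-- def _extract_nbpc(pixels: list, num_px: int,
--                   count: int, bpc: int) -> list:
--     """Extract `count` bits using N-bit-per-channel LSB."""
--     lsb_mask = (1 << bpc) - 1
--     total = num_px * 3 * bpc
--     bits: list = []
--     for i in range(count):
--         if i >= total:
--             break
--         c, r = divmod(i, bpc)
--         px, ch = divmod(c, 3)
--         bits.append(((pixels[px][ch] & lsb_mask) >> (bpc - 1 - r)) & 1)
--     return bits
-- ===== Notes on version B (the rewrite author's own statement) =====
-- stated objective: alternative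
-- what changed: Replaces the three nested guarded loops (pixels/channels/bit positions, each with a per-bit length check) by one flat loop over the output index i, recovering pixel, channel and shift by divmod address arithmetic.
import Mathlib
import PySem

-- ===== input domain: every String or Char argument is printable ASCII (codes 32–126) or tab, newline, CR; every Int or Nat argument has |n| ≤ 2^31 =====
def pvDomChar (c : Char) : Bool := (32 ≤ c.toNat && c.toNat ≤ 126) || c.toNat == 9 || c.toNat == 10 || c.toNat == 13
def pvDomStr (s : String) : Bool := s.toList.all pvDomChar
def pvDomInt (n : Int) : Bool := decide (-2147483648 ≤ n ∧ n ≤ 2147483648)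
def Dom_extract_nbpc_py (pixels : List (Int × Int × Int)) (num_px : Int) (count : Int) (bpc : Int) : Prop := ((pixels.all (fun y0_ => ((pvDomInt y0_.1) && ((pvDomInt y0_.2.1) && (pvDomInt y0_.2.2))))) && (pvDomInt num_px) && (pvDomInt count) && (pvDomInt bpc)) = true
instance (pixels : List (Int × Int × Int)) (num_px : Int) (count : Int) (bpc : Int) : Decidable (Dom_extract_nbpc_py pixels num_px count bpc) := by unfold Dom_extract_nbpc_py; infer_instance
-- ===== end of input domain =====

-- B replaces A's three nested guarded loops by one flat loop over the output index
-- with divmod address arithmetic (objective: alternative decomposition, same cost).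

-- shared primitives: pixels[p][ch] for an integer channel number ch in {0,1,2}, and (val >> bi) & 1
def pvChan (p : Int × Int × Int) (ch : Int) : Int :=
  if ch = 0 then p.1 else if ch = 1 then p.2.1 else p.2.2

def pvBit (val bi : Int) : Int := PySem.Int.band (val >>> bi.toNat) 1

-- ===== PORT A =====
-- innermost loop: for bi in range(bpc-1, -1, -1): if len(bits) >= count: break; bits.append((val >> bi) & 1)
def pvABits (count val : Int) (bits : List Int) : List Int → List Int
  | [] => bits
  | bi :: rest =>
      if count ≤ (bits.length : Int) then bits
      else pvABits count val (bits ++ [pvBit val bi]) rest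

-- middle loop: for ch in range(3): if len(bits) >= count: break; val = pixels[px_idx][ch] & lsb_mask; <bit loop>
def pvACh (pixels : List (Int × Int × Int)) (count mask bpc px_idx : Int) (bits : List Int) : List Int → List Int
  | [] => bits
  | ch :: rest =>
      if count ≤ (bits.length : Int) then bits
      else
        pvACh pixels count mask bpc px_idx
          (pvABits count (PySem.Int.band (pvChan (PySem.List.pyGetD pixels px_idx (0, 0, 0)) ch) mask)
            bits (PySem.List.pyRange (bpc - 1) (-1) (-1))) rest

-- outer loop: for px_idx in range(num_px): if len(bits) >= count: break; <channel loop>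
def pvAPx (pixels : List (Int × Int × Int)) (count mask bpc : Int) (bits : List Int) : List Int → List Int
  | [] => bits
  | px_idx :: rest =>
      if count ≤ (bits.length : Int) then bits
      else pvAPx pixels count mask bpc
        (pvACh pixels count mask bpc px_idx bits (PySem.List.pyRange 0 3 1)) rest

def extract_nbpc_py (pixels : List (Int × Int × Int)) (num_px : Int) (count : Int) (bpc : Int) : List Int :=
  let lsb_mask : Int := (1 <<< bpc.toNat) - 1
  pvAPx pixels count lsb_mask bpc [] (PySem.List.pyRange 0 num_px 1)

-- ===== PORT B =====
-- for i in range(count): if i >= total: break; c,r = divmod(i,bpc); px,ch = divmod(c,3); append bit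
def pvBLoop (pixels : List (Int × Int × Int)) (mask total bpc : Int) : List Int → List Int
  | [] => []
  | i :: rest =>
      if total ≤ i then []
      else
        let c := PySem.Int.floordiv i bpc
        let r := PySem.Int.mod i bpc
        let px := PySem.Int.floordiv c 3
        let ch := PySem.Int.mod c 3
        pvBit (PySem.Int.band (pvChan (PySem.List.pyGetD pixels px (0, 0, 0)) ch) mask) (bpc - 1 - r)
          :: pvBLoop pixels mask total bpc rest

def extract_nbpc_py_alt (pixels : List (Int × Int × Int)) (num_px : Int) (count : Int) (bpc : Int) : List Int :=
  let lsb_mask : Int := (1 <<< bpc.toNat) - 1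
  let total : Int := num_px * 3 * bpc
  pvBLoop pixels lsb_mask total bpc (PySem.List.pyRange 0 count 1)

-- ===== PRECONDITION & SPEC =====
-- Pre_ excludes exactly the inputs where the Python A raises: bpc < 0 (ValueError at 1 << bpc),
-- and IndexError when the scan reaches a pixel index beyond len(pixels) (num_px > len(pixels)
-- while bits are still wanted); on every input in Pre_, A returns normally.
def Pre_extract_nbpc_py (pixels : List (Int × Int × Int)) (num_px : Int) (count : Int) (bpc : Int) : Prop :=
  0 ≤ bpc ∧ (count ≤ 0 ∨ num_px ≤ (pixels.length : Int) ∨ (0 < bpc ∧ count ≤ (pixels.length : Int) * 3 * bpc))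
instance (pixels : List (Int × Int × Int)) (num_px : Int) (count : Int) (bpc : Int) : Decidable (Pre_extract_nbpc_py pixels num_px count bpc) := by unfold Pre_extract_nbpc_py; infer_instance

def pvWitness_extract_nbpc_py : (List (Int × Int × Int)) × Int × Int × Int := ([(5, 2, 7)], 1, 4, 2)

def Spec_extract_nbpc_py (pixels : List (Int × Int × Int)) (num_px : Int) (count : Int) (bpc : Int) (out : List Int) : Prop := out = extract_nbpc_py_alt pixels num_px count bpc
instance (pixels : List (Int × Int × Int)) (num_px : Int) (count : Int) (bpc : Int) (out : List Int) : Decidable (Spec_extract_nbpc_py pixels num_px count bpc out) := by unfold Spec_extract_nbpc_py; infer_instance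

-- ===== CLAIM =====
def Claim_equal_extract_nbpc_py : Prop := ∀ (pixels : List (Int × Int × Int)) (num_px : Int) (count : Int) (bpc : Int), Dom_extract_nbpc_py pixels num_px count bpc → Pre_extract_nbpc_py pixels num_px count bpc → Spec_extract_nbpc_py pixels num_px count bpc (extract_nbpc_py pixels num_px count bpc)

-- ===== LEMMAS AND PROOFS =====

-- the bit B emits at flat output index i
def pvBitAt (pixels : List (Int × Int × Int)) (mask bpc i : Int) : Int :=
  pvBit (PySem.Int.band
    (pvChan (PySem.List.pyGetD pixels (PySem.Int.floordiv (PySem.Int.floordiv i bpc) 3) (0, 0, 0))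
      (PySem.Int.mod (PySem.Int.floordiv i bpc) 3)) mask)
    (bpc - 1 - PySem.Int.mod i bpc)

-- the bit block A emits for one (pixel, channel), and for one pixel
def pvChBits (pixels : List (Int × Int × Int)) (mask bpc p ch : Int) : List Int :=
  (PySem.List.pyRange (bpc - 1) (-1) (-1)).map
    (pvBit (PySem.Int.band (pvChan (PySem.List.pyGetD pixels p (0, 0, 0)) ch) mask))

def pvPxBits (pixels : List (Int × Int × Int)) (mask bpc p : Int) : List Int :=
  (PySem.List.pyRange 0 3 1).flatMap (pvChBits pixels mask bpc p)

lemma pvABits_take (count val : Int) (bits : List Int) (bis : List Int) :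
    pvABits count val bits bis = bits ++ (bis.map (pvBit val)).take (count - bits.length).toNat := by
  induction bis generalizing bits with
  | nil => simp [pvABits]
  | cons bi rest ih =>
    rw [pvABits]
    by_cases h : count ≤ (bits.length : Int)
    · rw [if_pos h]
      have h0 : (count - (bits.length : Int)).toNat = 0 := by omega
      simp [h0]
    · rw [if_neg h, ih]
      have h1 : (count - (bits.length : Int)).toNat
          = (count - ((bits ++ [pvBit val bi]).length : Int)).toNat + 1 := by simp; omega
      rw [h1, List.map_cons, List.take_succ_cons, List.append_assoc]
      rfl

lemma pvACh_take (pixels : List (Int × Int × Int)) (count mask bpc px_idx : Int) (bits : List Int) (chs : List Int) :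
    pvACh pixels count mask bpc px_idx bits chs =
      bits ++ (chs.flatMap (pvChBits pixels mask bpc px_idx)).take (count - bits.length).toNat := by
  induction chs generalizing bits with
  | nil => simp [pvACh]
  | cons ch rest ih =>
    rw [pvACh]
    by_cases h : count ≤ (bits.length : Int)
    · rw [if_pos h]
      have h0 : (count - (bits.length : Int)).toNat = 0 := by omega
      simp [h0]
    · rw [if_neg h, pvABits_take, ih]
      have hfold : List.map (pvBit (PySem.Int.band (pvChan (PySem.List.pyGetD pixels px_idx (0, 0, 0)) ch) mask)) (PySem.List.pyRange (bpc - 1) (-1) (-1)) = pvChBits pixels mask bpc px_idx ch := rfl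
      rw [hfold, List.flatMap_cons, List.take_append, ← List.append_assoc]
      congr 2
      simp only [List.length_append, List.length_take]
      push_cast
      omega

lemma pvAPx_take (pixels : List (Int × Int × Int)) (count mask bpc : Int) (bits : List Int) (pxs : List Int) :
    pvAPx pixels count mask bpc bits pxs =
      bits ++ (pxs.flatMap (pvPxBits pixels mask bpc)).take (count - bits.length).toNat := by
  induction pxs generalizing bits with
  | nil => simp [pvAPx]
  | cons p rest ih =>
    rw [pvAPx]
    by_cases h : count ≤ (bits.length : Int)
    · rw [if_pos h]
      have h0 : (count - (bits.length : Int)).toNat = 0 := by omega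
      simp [h0]
    · rw [if_neg h, pvACh_take, ih]
      have hfold : List.flatMap (pvChBits pixels mask bpc p) (PySem.List.pyRange 0 3 1) = pvPxBits pixels mask bpc p := rfl
      rw [hfold, List.flatMap_cons, List.take_append, ← List.append_assoc]
      congr 2
      simp only [List.length_append, List.length_take]
      push_cast
      omega

lemma pvChBits_eq (pixels : List (Int × Int × Int)) (mask bpc p ch : Int)
    (hch : 0 ≤ ch) (hch3 : ch < 3) (hb : 0 ≤ bpc) :
    pvChBits pixels mask bpc p ch =
      (PySem.List.pyRange (bpc * (3 * p + ch)) (bpc * (3 * p + ch) + bpc) 1).map (pvBitAt pixels mask bpc) := by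
  rw [pvChBits, PySem.List.pyRange_neg_one, PySem.List.pyRange_one, List.map_map, List.map_map]
  have he : (bpc - 1 - -1).toNat = (bpc * (3 * p + ch) + bpc - bpc * (3 * p + ch)).toNat := by omega
  rw [he]
  apply List.map_congr_left
  intro k hk
  have hkb : (k : Int) < bpc := by
    have := List.mem_range.mp hk
    omega
  have hbpos : 0 < bpc := by omega
  have hq : PySem.Int.floordiv (bpc * (3 * p + ch) + k) bpc = 3 * p + ch := by
    rw [PySem.Int.floordiv_eq_iff_of_pos hbpos]
    constructor <;> nlinarith [Int.natCast_nonneg k]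
  have hr : PySem.Int.mod (bpc * (3 * p + ch) + k) bpc = k := by
    have := PySem.Int.floordiv_mul_add_mod (bpc * (3 * p + ch) + k) bpc
    rw [hq] at this
    nlinarith
  have hq3 : PySem.Int.floordiv (3 * p + ch) 3 = p := by
    rw [PySem.Int.floordiv_eq_iff_of_pos (by omega : (0:Int) < 3)]
    omega
  have hr3 : PySem.Int.mod (3 * p + ch) 3 = ch := by
    have := PySem.Int.floordiv_mul_add_mod (3 * p + ch) 3
    rw [hq3] at this
    omega
  simp only [Function.comp, pvBitAt, hq, hr, hq3, hr3]

lemma pvPxBits_eq (pixels : List (Int × Int × Int)) (mask bpc p : Int) (hb : 0 ≤ bpc) :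
    pvPxBits pixels mask bpc p =
      (PySem.List.pyRange (3 * bpc * p) (3 * bpc * (p + 1)) 1).map (pvBitAt pixels mask bpc) := by
  have h3 : PySem.List.pyRange 0 3 1 = [0, 1, 2] := by decide
  rw [pvPxBits, h3]
  simp only [List.flatMap_cons, List.flatMap_nil, List.append_nil]
  rw [pvChBits_eq pixels mask bpc p 0 (by omega) (by omega) hb,
      pvChBits_eq pixels mask bpc p 1 (by omega) (by omega) hb,
      pvChBits_eq pixels mask bpc p 2 (by omega) (by omega) hb]
  rw [← List.map_append, ← List.map_append]
  congr 1
  have e0 : bpc * (3 * p + 0) = 3 * bpc * p := by ring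
  have e1 : 3 * bpc * p + bpc = bpc * (3 * p + 1) := by ring
  have e2 : bpc * (3 * p + 1) + bpc = bpc * (3 * p + 2) := by ring
  have e3 : bpc * (3 * p + 2) + bpc = 3 * bpc * (p + 1) := by ring
  rw [e0, e1, e2, e3]
  rw [← PySem.List.pyRange_one_append (bpc * (3 * p + 1)) (bpc * (3 * p + 2)) (3 * bpc * (p + 1)) (by nlinarith) (by nlinarith)]
  rw [← PySem.List.pyRange_one_append (3 * bpc * p) (bpc * (3 * p + 1)) (3 * bpc * (p + 1)) (by nlinarith) (by nlinarith)]

lemma pvStream_eq (pixels : List (Int × Int × Int)) (mask bpc num_px : Int) (p : Int)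
    (hp : 0 ≤ p) (hb : 0 ≤ bpc) :
    (PySem.List.pyRange p num_px 1).flatMap (pvPxBits pixels mask bpc) =
      (PySem.List.pyRange (3 * bpc * p) (3 * bpc * num_px) 1).map (pvBitAt pixels mask bpc) := by
  induction hn : (num_px - p).toNat generalizing p with
  | zero =>
    have hle : num_px ≤ p := by omega
    rw [PySem.List.pyRange_one_eq_nil hle, PySem.List.pyRange_one_eq_nil (by nlinarith)]
    simp
  | succ n ih =>
    have hlt : p < num_px := by omega
    rw [PySem.List.pyRange_one_cons hlt, List.flatMap_cons,
        pvPxBits_eq pixels mask bpc p hb, ih (p + 1) (by omega) (by omega)]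
    rw [← List.map_append]
    congr 1
    rw [← PySem.List.pyRange_one_append (3 * bpc * p) (3 * bpc * (p + 1)) (3 * bpc * num_px) (by nlinarith) (by nlinarith)]

lemma pvBLoop_eq (pixels : List (Int × Int × Int)) (mask total bpc count : Int) (i : Int) :
    pvBLoop pixels mask total bpc (PySem.List.pyRange i count 1) =
      (PySem.List.pyRange i (min count total) 1).map (pvBitAt pixels mask bpc) := by
  induction hn : (count - i).toNat generalizing i with
  | zero =>
    have hle : count ≤ i := by omega
    rw [PySem.List.pyRange_one_eq_nil hle, PySem.List.pyRange_one_eq_nil (by omega)]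
    rfl
  | succ n ih =>
    have hlt : i < count := by omega
    rw [PySem.List.pyRange_one_cons hlt]
    show (if total ≤ i then [] else
        pvBitAt pixels mask bpc i :: pvBLoop pixels mask total bpc (PySem.List.pyRange (i + 1) count 1)) = _
    by_cases ht : total ≤ i
    · rw [if_pos ht, PySem.List.pyRange_one_eq_nil (by omega)]
      rfl
    · rw [if_neg ht, ih (i + 1) (by omega)]
      rw [PySem.List.pyRange_one_cons (by omega : i < min count total), List.map_cons]

lemma pvTake_pyRange (count total : Int) (f : Int → Int) (h : 0 ≤ count) :
    ((PySem.List.pyRange 0 total 1).map f).take count.toNat =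
      (PySem.List.pyRange 0 (min count total) 1).map f := by
  rw [← List.map_take]
  congr 1
  rw [PySem.List.pyRange_one, PySem.List.pyRange_one, ← List.map_take, List.take_range]
  have hm : min count.toNat (total - 0).toNat = (min count total - 0).toNat := by omega
  rw [hm]

-- ===== VERDICT =====
theorem extract_nbpc_py_spec : Claim_equal_extract_nbpc_py := by
  intro pixels num_px count bpc _ hpre
  obtain ⟨hb, -⟩ := hpre
  show extract_nbpc_py pixels num_px count bpc = extract_nbpc_py_alt pixels num_px count bpc
  show pvAPx pixels count (((1 : Int) <<< bpc.toNat) - 1) bpc [] (PySem.List.pyRange 0 num_px 1) =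
      pvBLoop pixels (((1 : Int) <<< bpc.toNat) - 1) (num_px * 3 * bpc) bpc (PySem.List.pyRange 0 count 1)
  rw [pvAPx_take, pvStream_eq pixels _ bpc num_px 0 le_rfl hb, pvBLoop_eq]
  have h0 : 3 * bpc * (0 : Int) = 0 := by ring
  have ht : 3 * bpc * num_px = num_px * 3 * bpc := by ring
  rw [h0, ht]
  simp only [List.nil_append, List.length_nil, Int.natCast_zero, sub_zero]
  by_cases hc : 0 ≤ count
  · exact pvTake_pyRange count (num_px * 3 * bpc) _ hc
  · have h1 : count.toNat = 0 := by omega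
    rw [h1, List.take_zero, PySem.List.pyRange_one_eq_nil (by omega), List.map_nil]
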